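-- pv_equiv track=rewrite | github.com/rhnvrm/stock-market-circulars | scripts/analysis/find_merge_candidates.py | get_stem
-- ===== SOURCE A (Python) =====
-- def get_stem(tag):
--     """Get a rough stem by removing common suffixes."""
--     tag = tag.lower()
--     # Remove common suffixes
--     for suffix in ['-listing', '-issue', '-allotment', '-redemption', '-payment',
--                    '-securities', '-shares', '-fund', '-funds', '-market',
--                    '-segment', '-trading', '-investors', '-investor', '-date',
--                    '-announcement', '-notice', '-circular', '-update', '-change',
--                    '-transfer', '-conversion', '-exercise', '-offer', '-period',
--                    '-requirement', '-requirements', '-compliance', '-action',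
--                    '-actions', '-suspension', '-restrictions', '-settlement']:
--         if tag.endswith(suffix):
--             return tag[:-len(suffix)]
--     return tag
-- ===== SOURCE B (Python) =====
-- _WORDS = frozenset(
--     "listing issue allotment redemption payment securities shares fund funds "
--     "market segment trading investors investor date announcement notice "
--     "circular update change transfer conversion exercise offer period "
--     "requirement requirements compliance action actions suspension "
--     "restrictions settlement".split()
-- )
--
--
-- def get_stem(tag):
--     """Get a rough stem by removing common suffixes."""
--     tag = tag.lower()
--     i = tag.rfind('-')
--     if i >= 0 and tag[i + 1:] in _WORDS:
--         return tag[:i]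
--     return tag
-- ===== Notes on version B (the rewrite author's own statement) =====
-- stated objective: idiomatic
-- what changed: Replaces the ordered scan over 32 dash-prefixed suffixes (each an endswith over the whole tag) with one rfind for the last dash plus a single frozenset membership test on the word after it; since no listed suffix word contains a dash, at most one suffix can ever match, so the scan is redundant.
import Mathlib
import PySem

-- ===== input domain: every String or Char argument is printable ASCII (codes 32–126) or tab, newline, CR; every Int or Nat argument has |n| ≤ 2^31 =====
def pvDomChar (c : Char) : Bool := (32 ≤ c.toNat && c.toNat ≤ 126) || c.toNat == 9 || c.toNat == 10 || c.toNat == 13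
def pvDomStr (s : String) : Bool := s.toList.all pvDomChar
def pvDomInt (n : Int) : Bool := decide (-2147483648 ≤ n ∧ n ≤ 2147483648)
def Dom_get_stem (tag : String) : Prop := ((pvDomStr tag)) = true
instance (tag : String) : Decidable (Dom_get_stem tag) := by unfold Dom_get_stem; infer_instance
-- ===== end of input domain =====

-- B replaces A's ordered scan of 32 '-suffix' endswith tests by one rfind for the last
-- dash plus a single set-membership test on the final word (idiomatic; same result).

-- ===== PORT A =====
-- the literal suffix list of A
def pvSuffixes : List (List Char) :=
  ["-listing".toList, "-issue".toList, "-allotment".toList, "-redemption".toList, "-payment".toList,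
   "-securities".toList, "-shares".toList, "-fund".toList, "-funds".toList, "-market".toList,
   "-segment".toList, "-trading".toList, "-investors".toList, "-investor".toList, "-date".toList,
   "-announcement".toList, "-notice".toList, "-circular".toList, "-update".toList, "-change".toList,
   "-transfer".toList, "-conversion".toList, "-exercise".toList, "-offer".toList, "-period".toList,
   "-requirement".toList, "-requirements".toList, "-compliance".toList, "-action".toList,
   "-actions".toList, "-suspension".toList, "-restrictions".toList, "-settlement".toList]

-- the for-loop of A: first suffix with tag.endswith(suffix) → tag[:-len(suffix)]
def pvGoA (cs : List Char) : List (List Char) → List Char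
  | [] => cs
  | s :: rest =>
      if PySem.Chars.endswith cs s then PySem.List.slice cs none (some (-(s.length : Int)))
      else pvGoA cs rest

def get_stem (tag : String) : String :=
  String.ofList (pvGoA (PySem.Chars.lower tag.toList) pvSuffixes)

-- ===== PORT B =====
-- Source B's frozenset _WORDS, built exactly as there: one space-joined literal, .split()
def pvWords : PySem.Set (List Char) :=
  PySem.Set.ofList (PySem.Chars.split₀
    ("listing issue allotment redemption payment securities shares fund funds " ++
     "market segment trading investors investor date announcement notice " ++
     "circular update change transfer conversion exercise offer period " ++
     "requirement requirements compliance action actions suspension " ++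
     "restrictions settlement").toList)

def get_stem_alt (tag : String) : String :=
  let cs := PySem.Chars.lower tag.toList
  let i := PySem.Chars.rfind cs ['-']
  if 0 ≤ i ∧ PySem.List.slice cs (some (i + 1)) none ∈ pvWords then
    String.ofList (PySem.List.slice cs none (some i))
  else String.ofList cs

-- ===== PRECONDITION & SPEC =====
def Spec_get_stem (tag : String) (out : String) : Prop := out = get_stem_alt tag
instance (tag : String) (out : String) : Decidable (Spec_get_stem tag out) := by unfold Spec_get_stem; infer_instance

-- ===== CLAIM (what is proved, stated in full; the proofs are below) =====
def Claim_equal_get_stem : Prop := ∀ (tag : String), Dom_get_stem tag → Spec_get_stem tag (get_stem tag)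

-- ===== LEMMAS AND PROOFS =====

-- proof-side view of a string: split at its LAST dash; none ↔ no '-' in cs
def pvLastDash : List Char → Option (List Char × List Char)
  | [] => none
  | c :: rest =>
      match pvLastDash rest with
      | some (h, w) => some (c :: h, w)
      | none => if c = '-' then some ([], rest) else none

theorem pvLastDash_none {cs : List Char} (h : pvLastDash cs = none) : '-' ∉ cs := by
  induction cs with
  | nil => simp
  | cons c rest ih =>
      simp only [pvLastDash] at h
      cases hr : pvLastDash rest with
      | some p => rw [hr] at h; cases p; simp at h
      | none =>
          rw [hr] at h
          by_cases hc : c = '-'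
          · simp [hc] at h
          · rw [if_neg hc] at h
            intro hm
            rcases List.mem_cons.mp hm with he | hmr
            · exact hc he.symm
            · exact ih hr hmr

theorem pvLastDash_some {cs h w : List Char} (hs : pvLastDash cs = some (h, w)) :
    cs = h ++ '-' :: w ∧ '-' ∉ w := by
  induction cs generalizing h w with
  | nil => simp [pvLastDash] at hs
  | cons c rest ih =>
      simp only [pvLastDash] at hs
      cases hr : pvLastDash rest with
      | some p =>
          rw [hr] at hs
          obtain ⟨h', w'⟩ := p
          simp only [Option.some.injEq, Prod.mk.injEq] at hs
          obtain ⟨rfl, rfl⟩ : c :: h' = h ∧ w' = w := ⟨hs.1, hs.2⟩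
          obtain ⟨he, hd⟩ := ih hr
          exact ⟨by simp [he], hd⟩
      | none =>
          rw [hr] at hs
          by_cases hc : c = '-'
          · subst hc
            rw [if_pos rfl] at hs
            obtain ⟨rfl, rfl⟩ := hs
            exact ⟨by simp, pvLastDash_none hr⟩
          · simp [hc] at hs

-- a one-char needle is a prefix of drop k iff the char sits at position k
theorem pvIsPrefix_drop_iff (cs : List Char) (k : Nat) :
    ['-'].isPrefixOf (cs.drop k) = true ↔ cs[k]? = some '-' := by
  rw [show cs[k]? = (cs.drop k).head? from List.head?_drop.symm]
  rcases cs.drop k with _ | ⟨c, t⟩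
  · simp [List.isPrefixOf]
  · constructor
    · intro hp
      have hc : '-' = c := (List.cons_prefix_cons.mp (List.isPrefixOf_iff_prefix.mp hp)).1
      simp [← hc]
    · intro hq
      have hc : c = '-' := by simpa using hq
      subst hc
      simp [List.isPrefixOf]

-- unfolding equations for rfind.go
theorem pvGo_zero (cs sub : List Char) :
    PySem.Chars.rfind.go cs sub 0 = if sub.isPrefixOf cs then 0 else -1 := rfl

theorem pvGo_succ (cs sub : List Char) (m : Nat) :
    PySem.Chars.rfind.go cs sub (m + 1) =
      if sub.isPrefixOf (cs.drop (m + 1)) then ((m + 1 : Nat) : Int)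
      else PySem.Chars.rfind.go cs sub m := rfl

-- rfind.go finds the greatest marked position ≤ n …
theorem pvGo_eq_of {cs : List Char} {n k : Nat} (hk : cs[k]? = some '-') (hkn : k ≤ n)
    (hup : ∀ j, k < j → j ≤ n → cs[j]? ≠ some '-') :
    PySem.Chars.rfind.go cs ['-'] n = (k : Int) := by
  induction n with
  | zero =>
      have hk0 : k = 0 := by omega
      subst hk0
      have hp : ['-'].isPrefixOf cs = true := by
        have := (pvIsPrefix_drop_iff cs 0).mpr hk
        simpa using this
      rw [pvGo_zero, if_pos hp]
      simp
  | succ m ih =>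
      by_cases he : k = m + 1
      · subst he
        rw [pvGo_succ, if_pos ((pvIsPrefix_drop_iff cs (m + 1)).mpr hk)]
      · have hne : cs[m + 1]? ≠ some '-' := hup (m + 1) (by omega) (by omega)
        have hnp : ¬ ['-'].isPrefixOf (cs.drop (m + 1)) = true := by
          rw [pvIsPrefix_drop_iff]; exact hne
        rw [pvGo_succ, if_neg hnp]
        exact ih (by omega) (fun j hj1 hj2 => hup j hj1 (by omega))

-- … and is -1 when no position ≤ n is marked
theorem pvGo_neg {cs : List Char} {n : Nat} (h : ∀ j, j ≤ n → cs[j]? ≠ some '-') :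
    PySem.Chars.rfind.go cs ['-'] n = -1 := by
  induction n with
  | zero =>
      have hnp : ¬ ['-'].isPrefixOf cs = true := by
        have := (pvIsPrefix_drop_iff cs 0).not.mpr (h 0 (le_refl 0))
        simpa using this
      rw [pvGo_zero, if_neg hnp]
  | succ m ih =>
      have hnp : ¬ ['-'].isPrefixOf (cs.drop (m + 1)) = true := by
        rw [pvIsPrefix_drop_iff]; exact h (m + 1) (le_refl _)
      rw [pvGo_succ, if_neg hnp]
      exact ih (fun j hj => h j (by omega))

theorem pvRfind_no_dash {cs : List Char} (h : '-' ∉ cs) :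
    PySem.Chars.rfind cs ['-'] = -1 := by
  unfold PySem.Chars.rfind
  exact pvGo_neg (fun j _ hc => h (List.mem_of_getElem? hc))

theorem pvRfind_last {h w : List Char} (hw : '-' ∉ w) :
    PySem.Chars.rfind (h ++ '-' :: w) ['-'] = (h.length : Int) := by
  unfold PySem.Chars.rfind
  refine pvGo_eq_of ?_ ?_ ?_
  · rw [List.getElem?_append_right (le_refl _)]
    simp
  · simp
  · intro j hj _ hc
    have hjl : j < (h ++ '-' :: w).length := (List.getElem?_eq_some_iff.mp hc).1
    rw [List.getElem?_append_right (by omega)] at hc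
    rcases Nat.exists_eq_add_of_lt hj with ⟨d, rfl⟩
    have : (('-' :: w)[d + 1]?) = some '-' := by
      have : h.length + d + 1 - h.length = d + 1 := by omega
      rwa [this] at hc
    simp only [List.getElem?_cons_succ] at this
    exact hw (List.mem_of_getElem? this)

-- suffix of a suffix, by length
theorem pvSuffix_of_suffix_le {α : Type} {l₁ l₂ cs : List α}
    (h1 : l₁ <:+ cs) (h2 : l₂ <:+ cs) (hl : l₁.length ≤ l₂.length) : l₁ <:+ l₂ := by
  have := List.prefix_of_prefix_length_le (List.reverse_prefix.mpr h1)
    (List.reverse_prefix.mpr h2) (by simpa using hl)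
  simpa using List.reverse_prefix.mp (by simpa using this)

-- uniqueness: a dash-free word matched as '-'::w' against h ++ '-'::w (w dash-free) is w
theorem pvUniqueMatch {h w w' : List Char} (hw : '-' ∉ w) (hw' : '-' ∉ w')
    (hsuf : ('-' :: w') <:+ (h ++ '-' :: w)) : w' = w := by
  rcases Nat.lt_trichotomy w'.length w.length with hlt | heq | hgt
  · have hs : ('-' :: w') <:+ ('-' :: w) :=
      pvSuffix_of_suffix_le hsuf (List.suffix_append _ _) (by simp; omega)
    have : ('-' :: w') <:+ w := by
      rcases List.suffix_cons_iff.mp hs with he | ht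
      · exact absurd (congrArg List.length he) (by simp; omega)
      · exact ht
    exact absurd (this.subset (by simp)) hw
  · have hs : ('-' :: w) <:+ (h ++ '-' :: w) := List.suffix_append _ _
    have : ('-' :: w') = ('-' :: w) :=
      List.IsSuffix.eq_of_length_le (pvSuffix_of_suffix_le hsuf hs (by simp [heq])) (by simp [heq])
    simpa using this
  · have hs : ('-' :: w) <:+ ('-' :: w') :=
      pvSuffix_of_suffix_le (List.suffix_append _ _) hsuf (by simp; omega)
    have : ('-' :: w) <:+ w' := by
      rcases List.suffix_cons_iff.mp hs with he | ht
      · exact absurd (congrArg List.length he) (by simp; omega)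
      · exact ht
    exact absurd (this.subset (by simp)) hw'

theorem pvGoA_no_match {cs : List Char} : ∀ {L : List (List Char)},
    (∀ s ∈ L, ¬ s <:+ cs) → pvGoA cs L = cs := by
  intro L
  induction L with
  | nil => intro _; rfl
  | cons s rest ih =>
      intro hno
      have : ¬ PySem.Chars.endswith cs s = true := by
        rw [PySem.Chars.endswith_iff]; exact hno s (by simp)
      simp only [pvGoA, if_neg this]
      exact ih fun t ht => hno t (by simp [ht])

theorem pvGoA_unique {cs s0 : List Char} : ∀ {L : List (List Char)},
    s0 ∈ L → s0 <:+ cs → (∀ s ∈ L, s <:+ cs → s = s0) →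
    pvGoA cs L = PySem.List.slice cs none (some (-(s0.length : Int))) := by
  intro L
  induction L with
  | nil => simp
  | cons s rest ih =>
      intro hm hsuf huniq
      by_cases hend : PySem.Chars.endswith cs s = true
      · have he : s = s0 := huniq s (by simp) ((PySem.Chars.endswith_iff _ _).mp hend)
        subst he
        simp only [pvGoA, if_pos hend]
      · have hne : s ≠ s0 := fun he => hend ((PySem.Chars.endswith_iff _ _).mpr (he ▸ hsuf))
        have hm' : s0 ∈ rest := by rcases List.mem_cons.mp hm with he | h; exact absurd he.symm hne; exact h
        simp only [pvGoA, if_neg hend]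
        exact ih hm' hsuf fun t ht => huniq t (by simp [ht])

-- the two literal vocabularies correspond, and every word is dash-free
def pvWordList : List (List Char) :=
  ["listing".toList, "issue".toList, "allotment".toList, "redemption".toList, "payment".toList,
   "securities".toList, "shares".toList, "fund".toList, "funds".toList, "market".toList,
   "segment".toList, "trading".toList, "investors".toList, "investor".toList, "date".toList,
   "announcement".toList, "notice".toList, "circular".toList, "update".toList, "change".toList,
   "transfer".toList, "conversion".toList, "exercise".toList, "offer".toList, "period".toList,
   "requirement".toList, "requirements".toList, "compliance".toList, "action".toList,
   "actions".toList, "suspension".toList, "restrictions".toList, "settlement".toList]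

set_option maxRecDepth 4000 in
theorem pvMem_pvWords (w : List Char) : w ∈ pvWords ↔ w ∈ pvWordList := by
  unfold pvWords
  rw [PySem.Set.mem_ofList]
  rw [show PySem.Chars.split₀
    (("listing issue allotment redemption payment securities shares fund funds " ++
      "market segment trading investors investor date announcement notice " ++
      "circular update change transfer conversion exercise offer period " ++
      "requirement requirements compliance action actions suspension " ++
      "restrictions settlement").toList) = pvWordList from by decide]

theorem pvSuffixes_eq : pvSuffixes = pvWordList.map (fun w => '-' :: w) := by decide
theorem pvWordList_dashfree : ∀ w ∈ pvWordList, '-' ∉ w := by decide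

-- core: the char-list computations agree
theorem pvCore (cs : List Char) :
    pvGoA cs pvSuffixes =
      (match pvLastDash cs with
       | some (h, w) => if w ∈ pvWordList then h else cs
       | none => cs) := by
  cases hr : pvLastDash cs with
  | none =>
      have hnd := pvLastDash_none hr
      refine pvGoA_no_match ?_
      intro s hs hsuf
      rw [pvSuffixes_eq] at hs
      obtain ⟨w, _, rfl⟩ := List.mem_map.mp hs
      exact hnd (hsuf.subset (by simp))
  | some p =>
      obtain ⟨h, w⟩ := p
      obtain ⟨hcs, hwd⟩ := pvLastDash_some hr
      by_cases hmem : w ∈ pvWordList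
      · simp only [if_pos hmem]
        have hs0 : ('-' :: w) ∈ pvSuffixes := by
          rw [pvSuffixes_eq]; exact List.mem_map.mpr ⟨w, hmem, rfl⟩
        have hsuf : ('-' :: w) <:+ cs := hcs ▸ List.suffix_append _ _
        have huniq : ∀ s ∈ pvSuffixes, s <:+ cs → s = ('-' :: w) := by
          intro s hs hssuf
          rw [pvSuffixes_eq] at hs
          obtain ⟨w', hw', rfl⟩ := List.mem_map.mp hs
          rw [hcs] at hssuf
          exact congrArg ('-' :: ·) (pvUniqueMatch hwd (pvWordList_dashfree w' hw') hssuf)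
        rw [pvGoA_unique hs0 hsuf huniq]
        rw [show (-((('-' :: w).length : Nat) : Int)) = -(((w.length + 1 : Nat)) : Int) by simp,
          PySem.List.slice_to_neg_natCast cs (w.length + 1) (by omega)]
        rw [hcs]
        simp
      · simp only [if_neg hmem]
        refine pvGoA_no_match ?_
        intro s hs hssuf
        rw [pvSuffixes_eq] at hs
        obtain ⟨w', hw', rfl⟩ := List.mem_map.mp hs
        rw [hcs] at hssuf
        exact hmem ((pvUniqueMatch hwd (pvWordList_dashfree w' hw') hssuf) ▸ hw')

-- core for B: rfind + two slices compute the same match expression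
theorem pvCoreB (cs : List Char) :
    (if 0 ≤ PySem.Chars.rfind cs ['-'] ∧
        PySem.List.slice cs (some (PySem.Chars.rfind cs ['-'] + 1)) none ∈ pvWords then
       PySem.List.slice cs none (some (PySem.Chars.rfind cs ['-']))
     else cs) =
      (match pvLastDash cs with
       | some (h, w) => if w ∈ pvWordList then h else cs
       | none => cs) := by
  cases hr : pvLastDash cs with
  | none =>
      have hnd := pvLastDash_none hr
      rw [pvRfind_no_dash hnd]
      have hcond : ¬ (0 ≤ (-1 : Int) ∧
          PySem.List.slice cs (some ((-1 : Int) + 1)) none ∈ pvWords) := by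
        rintro ⟨hc, -⟩
        omega
      rw [if_neg hcond]
  | some p =>
      obtain ⟨h, w⟩ := p
      obtain ⟨hcs, hwd⟩ := pvLastDash_some hr
      subst hcs
      rw [pvRfind_last hwd]
      show _ = if w ∈ pvWordList then h else h ++ '-' :: w
      have hsplit : h ++ '-' :: w = (h ++ ['-']) ++ w := by simp
      have hslice_from :
          PySem.List.slice (h ++ '-' :: w) (some ((h.length : Int) + 1)) none = w := by
        rw [show ((h.length : Int) + 1) = ((h.length + 1 : Nat) : Int) by push_cast; ring,
          PySem.List.slice_from_natCast, hsplit,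
          show h.length + 1 = (h ++ ['-']).length by simp, List.drop_left]
      have hslice_to : PySem.List.slice (h ++ '-' :: w) none (some (h.length : Int)) = h := by
        rw [PySem.List.slice_to_natCast, List.take_left]
      by_cases hmem : w ∈ pvWordList
      · have hm' : w ∈ pvWords := (pvMem_pvWords w).mpr hmem
        rw [hslice_from, if_pos ⟨Int.natCast_nonneg _, hm'⟩, if_pos hmem, hslice_to]
      · have hm' : ¬ w ∈ pvWords := fun hc => hmem ((pvMem_pvWords w).mp hc)
        rw [hslice_from, if_neg (fun hc => hm' hc.2), if_neg hmem]

-- ===== VERDICT (by name: the statement is the Claim_ definition above) =====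
theorem get_stem_spec : Claim_equal_get_stem := by
  intro tag _
  unfold Spec_get_stem get_stem get_stem_alt
  simp only [← apply_ite String.ofList]
  rw [pvCore, pvCoreB (PySem.Chars.lower tag.toList)]
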